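-- pv_equiv track=rewrite | github.com/ivaradi/mlx | src/mlx/pirep.py | parseLogFromRPC
-- ===== SOURCE A (Python) =====
-- def parseLogFromRPC(log):
--     """Parse the given log coming from the RPC."""
--     index = 0
--     entries = []
--
--     inTimeStr = False
--     inEntry = False
--
--     timestr = ""
--     entry = ""
--
--     while index<len(log):
--         c = log[index]
--         index += 1
--
--         if c==']':
--             if inEntry:
--                 entries.append((timestr, entry))
--                 timestr = ""
--                 entry = ""
--
--             inTimeStr = False
--             inEntry = False
--         elif not inTimeStr and not inEntry:
--             if c=='[':
--                 if timestr:
--                     inEntry = True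
--                 else:
--                     inTimeStr = True
--         elif inTimeStr:
--             timestr += c
--         elif inEntry:
--             entry += c
--
--     return entries
-- ===== SOURCE B (Python) =====
-- def _tokenize(log):
--     """Return the contents of each '['...']' bracket group, in order."""
--     groups = []
--     rest = log
--     while True:
--         _, br, rest = rest.partition('[')
--         if not br:
--             return groups
--         group, br, rest = rest.partition(']')
--         if not br:
--             return groups
--         groups.append(group)
--
-- def parseLogFromRPC(log):
--     """Parse the given log coming from the RPC."""
--     entries = []
--     pending = ""
--     for group in _tokenize(log):
--         if pending:
--             entries.append((pending, group))
--             pending = ""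
--         else:
--             pending = group
--     return entries
-- ===== Notes on version B (the rewrite author's own statement) =====
-- stated objective: simpler
-- what changed: Replaces the flat five-variable per-character state machine by a tokenize-then-pair decomposition: first extract every bracket-group content with str.partition in a scanning loop, then pair consecutive groups with a single pending variable; the scanning is done by the C-implemented str.partition instead of a per-character Python loop.
import Mathlib
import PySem

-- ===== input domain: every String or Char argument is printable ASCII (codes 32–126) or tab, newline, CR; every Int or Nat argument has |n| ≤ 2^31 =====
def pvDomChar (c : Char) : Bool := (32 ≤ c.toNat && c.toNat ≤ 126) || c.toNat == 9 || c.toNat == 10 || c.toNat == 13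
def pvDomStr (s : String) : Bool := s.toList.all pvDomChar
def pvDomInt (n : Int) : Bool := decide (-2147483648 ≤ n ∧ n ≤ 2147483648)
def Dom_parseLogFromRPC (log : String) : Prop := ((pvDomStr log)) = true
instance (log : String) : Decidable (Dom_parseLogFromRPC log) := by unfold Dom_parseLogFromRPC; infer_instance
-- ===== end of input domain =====

-- B replaces A's flat five-variable state machine by a tokenize-then-pair decomposition (objective: simpler).

-- ===== PORT A =====
-- state = (entries, inTimeStr, inEntry, timestr, entry); buffers kept as List Char, turned into String when appended
def pAStep (st : List (String × String) × Bool × Bool × List Char × List Char) (c : Char) :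
    List (String × String) × Bool × Bool × List Char × List Char :=
  match st with
  | (es, inT, inE, ts, e) =>
    if c = ']' then
      if inE then (es ++ [(String.ofList ts, String.ofList e)], false, false, [], [])
      else (es, false, false, ts, e)
    else if !inT && !inE then
      if c = '[' then
        if ts ≠ [] then (es, false, true, ts, e) else (es, true, false, ts, e)
      else (es, inT, inE, ts, e)
    else if inT then (es, inT, inE, ts ++ [c], e)
    else (es, inT, inE, ts, e ++ [c])

def parseLogFromRPC (log : String) : List (String × String) :=
  (log.toList.foldl pAStep ([], false, false, [], [])).1

-- ===== PORT B =====
-- exact port of str.partition(ch) for a one-character separator: (before, found?, after)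
def pvPart (ch : Char) (cs : List Char) : List Char × Bool × List Char :=
  match cs.dropWhile (· ≠ ch) with
  | [] => (cs.takeWhile (· ≠ ch), false, [])
  | _ :: t => (cs.takeWhile (· ≠ ch), true, t)

theorem pvPart_rest_lt {ch : Char} {cs : List Char} (h : (pvPart ch cs).2.1 = true) :
    (pvPart ch cs).2.2.length < cs.length := by
  unfold pvPart at h ⊢
  split
  · rename_i hd
    rw [hd] at h
    simp at h
  · rename_i x t hd
    have hle : (x :: t).length ≤ cs.length := by
      rw [← hd]
      exact List.length_dropWhile_le _ _
    simp at hle ⊢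
    omega

-- B's _tokenize loop: contents of each '['..']' bracket group, in order
def pvTokenize (cs : List Char) : List (List Char) :=
  let p1 := pvPart '[' cs
  if h1 : p1.2.1 = true then
    let p2 := pvPart ']' p1.2.2
    if h2 : p2.2.1 = true then
      p2.1 :: pvTokenize p2.2.2
    else []
  else []
termination_by cs.length
decreasing_by exact Nat.lt_trans (pvPart_rest_lt h2) (pvPart_rest_lt h1)

-- B's pairing loop: state = (entries, pending)
def pvPair (st : List (String × String) × List Char) (g : List Char) :
    List (String × String) × List Char :=
  if st.2 ≠ [] then (st.1 ++ [(String.ofList st.2, String.ofList g)], []) else (st.1, g)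

def parseLogFromRPC_alt (log : String) : List (String × String) :=
  ((pvTokenize log.toList).foldl pvPair ([], [])).1

-- ===== PRECONDITION & SPEC =====
def Spec_parseLogFromRPC (log : String) (out : List (String × String)) : Prop := out = parseLogFromRPC_alt log
instance (log : String) (out : List (String × String)) : Decidable (Spec_parseLogFromRPC log out) := by unfold Spec_parseLogFromRPC; infer_instance

-- ===== CLAIM (what is proved, stated in full; the proofs are below) =====
def Claim_equal_parseLogFromRPC : Prop := ∀ (log : String), Dom_parseLogFromRPC log → Spec_parseLogFromRPC log (parseLogFromRPC log)

-- ===== LEMMAS AND PROOFS =====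

theorem pvPart_cons_ne {c ch : Char} (h : c ≠ ch) (cs : List Char) :
    pvPart ch (c :: cs) = (c :: (pvPart ch cs).1, (pvPart ch cs).2.1, (pvPart ch cs).2.2) := by
  have hdc : List.dropWhile (· ≠ ch) (c :: cs) = List.dropWhile (· ≠ ch) cs := by
    simp [List.dropWhile_cons, h]
  have htc : List.takeWhile (· ≠ ch) (c :: cs) = c :: List.takeWhile (· ≠ ch) cs := by
    simp [List.takeWhile_cons, h]
  unfold pvPart
  rw [hdc, htc]
  rcases hd : cs.dropWhile (· ≠ ch) with _ | ⟨x, r⟩ <;> simp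

theorem pvPart_cons_self (ch : Char) (cs : List Char) :
    pvPart ch (ch :: cs) = ([], true, cs) := by
  have hdc : List.dropWhile (· ≠ ch) (ch :: cs) = ch :: cs := by
    simp [List.dropWhile_cons]
  have htc : List.takeWhile (· ≠ ch) (ch :: cs) = [] := by
    simp [List.takeWhile_cons]
  unfold pvPart
  rw [hdc, htc]

theorem tok_cons_ne {c : Char} (h : c ≠ '[') (cs : List Char) :
    pvTokenize (c :: cs) = pvTokenize cs := by
  rw [pvTokenize, pvTokenize]
  simp [pvPart_cons_ne h]

theorem tok_bracket (cs : List Char) :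
    pvTokenize ('[' :: cs) =
      if (pvPart ']' cs).2.1 = true then
        (pvPart ']' cs).1 :: pvTokenize (pvPart ']' cs).2.2
      else [] := by
  rw [pvTokenize, pvPart_cons_self]
  simp

-- A in inTimeStr mode: append chars up to the first ']', then drop back to outside
theorem foldA_inTime (cs : List Char) (es : List (String × String)) (ts e : List Char) :
    cs.foldl pAStep (es, true, false, ts, e) =
      match cs.dropWhile (· ≠ ']') with
      | [] => (es, true, false, ts ++ cs.takeWhile (· ≠ ']'), e)
      | _ :: r => r.foldl pAStep (es, false, false, ts ++ cs.takeWhile (· ≠ ']'), e) := by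
  induction cs generalizing ts with
  | nil => simp
  | cons c cs' ih =>
    by_cases hc : c = ']'
    · subst hc
      have hdc : List.dropWhile (· ≠ ']') (']' :: cs') = ']' :: cs' := by
        simp [List.dropWhile_cons]
      have htc : List.takeWhile (· ≠ ']') (']' :: cs') = [] := by
        simp [List.takeWhile_cons]
      rw [hdc, htc, List.foldl_cons, show pAStep (es, true, false, ts, e) ']'
          = (es, false, false, ts, e) by simp [pAStep]]
      simp
    · have hdc : List.dropWhile (· ≠ ']') (c :: cs') = List.dropWhile (· ≠ ']') cs' := by
        simp [List.dropWhile_cons, hc]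
      have htc : List.takeWhile (· ≠ ']') (c :: cs') = c :: List.takeWhile (· ≠ ']') cs' := by
        simp [List.takeWhile_cons, hc]
      rw [List.foldl_cons, show pAStep (es, true, false, ts, e) c
            = (es, true, false, ts ++ [c], e) by simp [pAStep, hc], ih (ts ++ [c]), hdc, htc]
      rcases hd : cs'.dropWhile (· ≠ ']') with _ | ⟨x, r⟩ <;> simp

-- A in inEntry mode: append chars up to the first ']', then emit the pair and reset
theorem foldA_inEntry (cs : List Char) (es : List (String × String)) (ts e : List Char) :
    cs.foldl pAStep (es, false, true, ts, e) =
      match cs.dropWhile (· ≠ ']') with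
      | [] => (es, false, true, ts, e ++ cs.takeWhile (· ≠ ']'))
      | _ :: r => r.foldl pAStep
          (es ++ [(String.ofList ts, String.ofList (e ++ cs.takeWhile (· ≠ ']')))], false, false, [], []) := by
  induction cs generalizing e with
  | nil => simp
  | cons c cs' ih =>
    by_cases hc : c = ']'
    · subst hc
      have hdc : List.dropWhile (· ≠ ']') (']' :: cs') = ']' :: cs' := by
        simp [List.dropWhile_cons]
      have htc : List.takeWhile (· ≠ ']') (']' :: cs') = [] := by
        simp [List.takeWhile_cons]
      rw [hdc, htc, List.foldl_cons, show pAStep (es, false, true, ts, e) ']'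
          = (es ++ [(String.ofList ts, String.ofList e)], false, false, [], []) by simp [pAStep]]
      simp
    · have hdc : List.dropWhile (· ≠ ']') (c :: cs') = List.dropWhile (· ≠ ']') cs' := by
        simp [List.dropWhile_cons, hc]
      have htc : List.takeWhile (· ≠ ']') (c :: cs') = c :: List.takeWhile (· ≠ ']') cs' := by
        simp [List.takeWhile_cons, hc]
      rw [List.foldl_cons, show pAStep (es, false, true, ts, e) c
            = (es, false, true, ts, e ++ [c]) by simp [pAStep, hc], ih (e ++ [c]), hdc, htc]
      rcases hd : cs'.dropWhile (· ≠ ']') with _ | ⟨x, r⟩ <;> simp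

theorem main_equiv : ∀ (n : Nat) (cs : List Char), cs.length ≤ n →
    ∀ (es : List (String × String)) (ts : List Char),
    (cs.foldl pAStep (es, false, false, ts, [])).1 =
    ((pvTokenize cs).foldl pvPair (es, ts)).1 := by
  intro n
  induction n with
  | zero =>
    intro cs hcs es ts
    match cs with
    | [] =>
      rw [pvTokenize]
      simp [pvPart]
    | c :: cs' => simp at hcs
  | succ n ih =>
    intro cs hcs es ts
    match cs with
    | [] =>
      rw [pvTokenize]
      simp [pvPart]
    | c :: cs' =>
      have hlen : cs'.length ≤ n := by simpa using hcs
      by_cases hbr : c = '['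
      · subst hbr
        rw [List.foldl_cons, tok_bracket]
        by_cases hts : ts = []
        · subst hts
          rw [show pAStep (es, false, false, [], []) '['
                = (es, true, false, [], []) by simp [pAStep], foldA_inTime]
          rcases hd : cs'.dropWhile (· ≠ ']') with _ | ⟨x, r⟩
          · rw [show pvPart ']' cs' = (cs'.takeWhile (· ≠ ']'), false, []) by
              unfold pvPart; rw [hd]]
            simp
          · rw [show pvPart ']' cs' = (cs'.takeWhile (· ≠ ']'), true, r) by
              unfold pvPart; rw [hd]]
            have hr : r.length ≤ n := by
              have hle := List.length_dropWhile_le (p := (· ≠ ']')) (l := cs')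
              rw [hd] at hle
              simp at hle
              omega
            have hmain := ih r hr es (cs'.takeWhile (· ≠ ']'))
            simp only [List.nil_append]
            rw [hmain]
            simp [pvPair]
        · rw [show pAStep (es, false, false, ts, []) '['
                = (es, false, true, ts, []) by simp [pAStep, hts], foldA_inEntry]
          rcases hd : cs'.dropWhile (· ≠ ']') with _ | ⟨x, r⟩
          · rw [show pvPart ']' cs' = (cs'.takeWhile (· ≠ ']'), false, []) by
              unfold pvPart; rw [hd]]
            simp
          · rw [show pvPart ']' cs' = (cs'.takeWhile (· ≠ ']'), true, r) by
              unfold pvPart; rw [hd]]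
            have hr : r.length ≤ n := by
              have hle := List.length_dropWhile_le (p := (· ≠ ']')) (l := cs')
              rw [hd] at hle
              simp at hle
              omega
            have hmain := ih r hr
              (es ++ [(String.ofList ts, String.ofList (cs'.takeWhile (· ≠ ']')))]) []
            simp only [List.nil_append]
            rw [hmain]
            simp [pvPair, hts]
      · rw [tok_cons_ne hbr, List.foldl_cons]
        by_cases hc : c = ']'
        · subst hc
          rw [show pAStep (es, false, false, ts, []) ']'
                = (es, false, false, ts, []) by simp [pAStep]]
          exact ih cs' hlen es ts
        · rw [show pAStep (es, false, false, ts, []) c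
                = (es, false, false, ts, []) by simp [pAStep, hc, hbr]]
          exact ih cs' hlen es ts

-- ===== VERDICT (by name: the statement is the Claim_ definition above) =====
theorem parseLogFromRPC_spec : Claim_equal_parseLogFromRPC := by
  intro log _
  unfold Spec_parseLogFromRPC parseLogFromRPC parseLogFromRPC_alt
  exact main_equiv log.toList.length log.toList le_rfl [] []
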